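-- pv_equiv track=rewrite | github.com/EcstaticFly/basic-dsa-practice | Codechef/p.py | min_flips_to_forest
-- ===== SOURCE A (Python) =====
-- class DSU:
--     def __init__(self, n):
--         self.p = list(range(n))
--     def find(self, x):
--         if self.p[x] != x:
--             self.p[x] = self.find(self.p[x])
--         return self.p[x]
--     def union(self, a, b):
--         ra, rb = self.find(a), self.find(b)
--         if ra == rb:
--             return False
--         self.p[rb] = ra
--         return True
--
-- def min_flips_to_forest(n, edges):
--     """
--     edges: list of (u, v, w) with w in {0,1}.
--     Return minimum flips on the w's so that
--     the subgraph of w==1 is acyclic.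
--     """
--     dsu = DSU(n)
--     flips = 0
--     for u, v, w in edges:
--         if w == 1:
--             if not dsu.union(u, v):
--                 flips += 1
--     return flips
-- ===== SOURCE B (Python) =====
-- def min_flips_to_forest(n, edges):
--     comp = list(range(n))
--     flips = 0
--     for u, v, w in edges:
--         if w == 1:
--             cu, cv = comp[u], comp[v]
--             if cu == cv:
--                 flips += 1
--             else:
--                 comp = [cu if c == cv else c for c in comp]
--     return flips
-- ===== Notes on version B (the rewrite author's own statement) =====
-- stated objective: alternative
-- what changed: Replaces the recursive path-compressing union-find with a flat component-label array: each w==1 edge compares the two endpoint labels and, on a merge, relabels the whole array in one pass; a cycle-closing edge is one whose endpoints already share a label.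
import Mathlib
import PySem

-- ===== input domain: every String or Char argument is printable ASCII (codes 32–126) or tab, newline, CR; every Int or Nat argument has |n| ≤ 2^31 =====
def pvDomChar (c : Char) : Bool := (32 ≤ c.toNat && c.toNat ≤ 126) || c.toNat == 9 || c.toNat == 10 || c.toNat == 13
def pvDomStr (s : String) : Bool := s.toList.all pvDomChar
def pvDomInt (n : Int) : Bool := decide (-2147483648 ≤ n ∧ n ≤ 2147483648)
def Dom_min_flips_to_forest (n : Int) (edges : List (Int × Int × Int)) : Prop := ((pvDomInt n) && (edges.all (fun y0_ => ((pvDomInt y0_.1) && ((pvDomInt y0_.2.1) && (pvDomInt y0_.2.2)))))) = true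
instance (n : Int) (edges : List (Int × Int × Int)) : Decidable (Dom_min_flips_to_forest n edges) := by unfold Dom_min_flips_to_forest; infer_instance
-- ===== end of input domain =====

-- B replaces A's union-find (path compression + recursion) by a flat component-label
-- array that is relabelled wholesale on each merge: a different algorithm of similar
-- size ("alternative"; not claimed faster).

-- ===== PORT A =====
-- DSU.find with path compression; the fuel argument is a totality guard only
-- (fuel p.length + 1 always suffices under Pre_; the 0 case is unreachable there).
def pvFindA (fuel : Nat) (p : List Int) (x : Int) : Int × List Int :=
  match fuel with
  | 0 => (x, p)
  | Nat.succ fuel =>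
    let px := PySem.List.pyGetD p x 0
    if px ≠ x then
      let rp := pvFindA fuel p px
      let p2 := PySem.List.pySetD rp.2 x rp.1
      (PySem.List.pyGetD p2 x 0, p2)
    else (px, p)

-- DSU.union
def pvUnionA (p : List Int) (a b : Int) : Bool × List Int :=
  let fa := pvFindA (p.length + 1) p a
  let fb := pvFindA (fa.2.length + 1) fa.2 b
  if fa.1 = fb.1 then (false, fb.2)
  else (true, PySem.List.pySetD fb.2 fb.1 fa.1)

-- loop body of A's for-loop
def pvLoopA (st : List Int × Int) (e : Int × Int × Int) : List Int × Int :=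
  if e.2.2 = 1 then
    let r := pvUnionA st.1 e.1 e.2.1
    (r.2, if r.1 then st.2 else st.2 + 1)
  else st

def min_flips_to_forest (n : Int) (edges : List (Int × Int × Int)) : Int :=
  (edges.foldl pvLoopA (PySem.List.pyRange 0 n 1, 0)).2

-- ===== PORT B =====
-- loop body of B's for-loop: compare labels, on a merge relabel the whole array
def pvLoopB (st : List Int × Int) (e : Int × Int × Int) : List Int × Int :=
  if e.2.2 = 1 then
    let cu := PySem.List.pyGetD st.1 e.1 0
    let cv := PySem.List.pyGetD st.1 e.2.1 0
    if cu = cv then (st.1, st.2 + 1)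
    else (st.1.map (fun c => if c = cv then cu else c), st.2)
  else st

def min_flips_to_forest_alt (n : Int) (edges : List (Int × Int × Int)) : Int :=
  (edges.foldl pvLoopB (PySem.List.pyRange 0 n 1, 0)).2

-- ===== PRECONDITION & SPEC =====
-- Pre_ excludes exactly the inputs where Python A raises IndexError: an edge with
-- w == 1 whose endpoint is outside [-n, n) as an index into the n-element parent list.
def Pre_min_flips_to_forest (n : Int) (edges : List (Int × Int × Int)) : Prop :=
  ∀ e ∈ edges, e.2.2 = 1 →
    PySem.Raise.InRange n.toNat e.1 ∧ PySem.Raise.InRange n.toNat e.2.1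
instance (n : Int) (edges : List (Int × Int × Int)) : Decidable (Pre_min_flips_to_forest n edges) := by unfold Pre_min_flips_to_forest; infer_instance

def pvWitness_min_flips_to_forest : Int × (List (Int × Int × Int)) :=
  (3, [(0, 1, 1), (1, 2, 1), (0, 2, 1)])

def Spec_min_flips_to_forest (n : Int) (edges : List (Int × Int × Int)) (out : Int) : Prop := out = min_flips_to_forest_alt n edges
instance (n : Int) (edges : List (Int × Int × Int)) (out : Int) : Decidable (Spec_min_flips_to_forest n edges out) := by unfold Spec_min_flips_to_forest; infer_instance

-- ===== CLAIM (what is proved, stated in full; the proofs are below) =====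
def Claim_equal_min_flips_to_forest : Prop := ∀ (n : Int) (edges : List (Int × Int × Int)), Dom_min_flips_to_forest n edges → Pre_min_flips_to_forest n edges → Spec_min_flips_to_forest n edges (min_flips_to_forest n edges)

-- ===== LEMMAS AND PROOFS =====

-- abstract view of A's parent array --------------------------------------------------
def pvStep (p : List Int) (i : Nat) : Nat := (p.getD i 0).toNat
def pvIter (p : List Int) (k : Nat) (i : Nat) : Nat := (pvStep p)^[k] i
abbrev pvRoot (p : List Int) (i : Nat) : Prop := p.getD i 0 = (i : Int)
def pvWf (p : List Int) : Prop := ∀ i < p.length, 0 ≤ p.getD i 0 ∧ p.getD i 0 < (p.length : Int)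
def pvRes (p : List Int) : Prop := ∀ i < p.length, ∃ k, pvRoot p (pvIter p k i)
def pvRepr (p : List Int) (i : Nat) : Nat := pvIter p p.length i
-- normalised (Python) index
def pvNorm (len : Nat) (x : Int) : Nat := if 0 ≤ x then x.toNat else len - (-x).toNat

lemma pvNorm_lt (len : Nat) (x : Int) (h : PySem.Raise.InRange len x) : pvNorm len x < len := by
  obtain ⟨h1, h2⟩ := h
  unfold pvNorm; split_ifs with h0 <;> omega

lemma pyGetD_norm (p : List Int) (x : Int) (d : Int) (h : PySem.Raise.InRange p.length x) :
    PySem.List.pyGetD p x d = p.getD (pvNorm p.length x) d := by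
  obtain ⟨h1, h2⟩ := h
  simp only [PySem.List.pyGetD, PySem.List.pyGet?, PySem.List.pyIdx?, pvNorm]
  by_cases h0 : 0 ≤ x
  · rw [if_pos h0, if_pos h2, if_pos h0]; simp [List.getD]
  · rw [if_neg h0, if_pos h1, if_neg h0]; simp [List.getD]

lemma pySetD_norm (p : List Int) (x : Int) (v : Int) (h : PySem.Raise.InRange p.length x) :
    PySem.List.pySetD p x v = p.set (pvNorm p.length x) v := by
  obtain ⟨h1, h2⟩ := h
  simp only [PySem.List.pySetD, PySem.List.pySet?, PySem.List.pyIdx?, pvNorm]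
  by_cases h0 : 0 ≤ x
  · rw [if_pos h0, if_pos h2, if_pos h0]; simp
  · rw [if_neg h0, if_pos h1, if_neg h0]; simp

-- basic iterate facts ---------------------------------------------------------------
lemma pvStep_lt {p : List Int} (hw : pvWf p) {i : Nat} (hi : i < p.length) :
    pvStep p i < p.length := by
  obtain ⟨h1, h2⟩ := hw i hi
  unfold pvStep; omega

lemma pvIter_lt {p : List Int} (hw : pvWf p) {i : Nat} (hi : i < p.length) (k : Nat) :
    pvIter p k i < p.length := by
  induction k generalizing i with
  | zero => simpa [pvIter]
  | succ k ih =>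
    have : pvIter p (k+1) i = pvIter p k (pvStep p i) := by
      simp [pvIter, Function.iterate_succ_apply]
    rw [this]; exact ih (pvStep_lt hw hi)

lemma pvIter_succ (p : List Int) (k i : Nat) :
    pvIter p (k+1) i = pvIter p k (pvStep p i) := by
  simp [pvIter, Function.iterate_succ_apply]

lemma pvIter_succ' (p : List Int) (k i : Nat) :
    pvIter p (k+1) i = pvStep p (pvIter p k i) := by
  simp [pvIter, Function.iterate_succ_apply']

lemma pvIter_add (p : List Int) (a b i : Nat) :
    pvIter p (a + b) i = pvIter p a (pvIter p b i) := by
  simp [pvIter, Function.iterate_add_apply]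

lemma pvRoot_step {p : List Int} {j : Nat} (h : pvRoot p j) : pvStep p j = j := by
  unfold pvRoot at h; unfold pvStep; rw [h]; simp

lemma pvRoot_iter {p : List Int} {j : Nat} (h : pvRoot p j) (k : Nat) : pvIter p k j = j := by
  induction k with
  | zero => simp [pvIter]
  | succ k ih => rw [pvIter_succ'] ; rw [ih, pvRoot_step h]

lemma pvIter_stable {p : List Int} {k i : Nat} (h : pvRoot p (pvIter p k i)) {m : Nat}
    (hm : k ≤ m) : pvIter p m i = pvIter p k i := by
  have : m = (m - k) + k := by omega
  rw [this, pvIter_add, pvRoot_iter h]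

-- pigeonhole: the minimal root distance is < p.length -------------------------------
lemma pvFind_lt_len {p : List Int} (hw : pvWf p) {i : Nat} (hi : i < p.length)
    (h : ∃ k, pvRoot p (pvIter p k i)) : Nat.find h < p.length := by
  set c := Nat.find h with hc
  have hroot : pvRoot p (pvIter p c i) := Nat.find_spec h
  have hinj : Function.Injective (fun a : Fin (c + 1) => (⟨pvIter p a i, pvIter_lt hw hi a⟩ : Fin p.length)) := by
    intro a b hab
    simp only [Fin.mk.injEq] at hab
    by_contra hne
    -- wlog a < b
    rcases Nat.lt_or_ge a.val b.val with hlt | hge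
    · have hble : b.val ≤ c := Nat.lt_succ_iff.mp b.isLt
      have : pvIter p (c - (b.val - a.val)) i = pvIter p c i := by
        have h1 : c - (b.val - a.val) = (c - b.val) + a.val := by omega
        have h2 : c = (c - b.val) + b.val := by omega
        rw [h1, pvIter_add, hab, ← pvIter_add, ← h2]
      have hlt' : c - (b.val - a.val) < c := by omega
      exact Nat.find_min h hlt' (this ▸ hroot)
    · have hne' : b.val < a.val := by
        rcases Nat.lt_or_ge b.val a.val with h' | h'
        · exact h'
        · exact absurd (Fin.ext (by omega)) hne
      have hale : a.val ≤ c := Nat.lt_succ_iff.mp a.isLt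
      have : pvIter p (c - (a.val - b.val)) i = pvIter p c i := by
        have h1 : c - (a.val - b.val) = (c - a.val) + b.val := by omega
        have h2 : c = (c - a.val) + a.val := by omega
        rw [h1, pvIter_add, ← hab, ← pvIter_add, ← h2]
      have hlt' : c - (a.val - b.val) < c := by omega
      exact Nat.find_min h hlt' (this ▸ hroot)
  have := Fintype.card_le_of_injective _ hinj
  simpa using this

lemma pvRepr_spec {p : List Int} (hw : pvWf p) (hr : pvRes p) {i : Nat} (hi : i < p.length) :
    pvRoot p (pvRepr p i) := by
  have h := hr i hi
  have hc := pvFind_lt_len hw hi h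
  have := pvIter_stable (Nat.find_spec h) (le_of_lt hc)
  unfold pvRepr; rw [this]; exact Nat.find_spec h

lemma pvRepr_lt {p : List Int} (hw : pvWf p) {i : Nat} (hi : i < p.length) :
    pvRepr p i < p.length := pvIter_lt hw hi _

lemma pvRoot_reached_repr {p : List Int} (hw : pvWf p) (hr : pvRes p) {i : Nat}
    (hi : i < p.length) {k : Nat} (h : pvRoot p (pvIter p k i)) :
    pvIter p k i = pvRepr p i := by
  have hex := hr i hi
  have hmin : Nat.find hex ≤ k := Nat.find_min' hex h
  have h1 : pvIter p k i = pvIter p (Nat.find hex) i := pvIter_stable (Nat.find_spec hex) hmin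
  have hc := pvFind_lt_len hw hi hex
  have h2 : pvIter p p.length i = pvIter p (Nat.find hex) i :=
    pvIter_stable (Nat.find_spec hex) (le_of_lt hc)
  unfold pvRepr; rw [h1, h2]

lemma pvRepr_root_fix {p : List Int} {i : Nat} (h : pvRoot p i) : pvRepr p i = i :=
  pvRoot_iter h _

lemma pvRepr_step {p : List Int} (hw : pvWf p) (hr : pvRes p) {i : Nat} (hi : i < p.length) :
    pvRepr p (pvStep p i) = pvRepr p i := by
  have hroot := pvRepr_spec hw hr hi
  have h1 : pvIter p (p.length + 1) i = pvRepr p (pvStep p i) := by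
    have : p.length + 1 = p.length + 1 := rfl
    unfold pvRepr
    rw [show p.length + 1 = p.length + 1 from rfl, ← pvIter_succ p p.length i]
  have h2 : pvIter p (p.length + 1) i = pvRepr p i := by
    unfold pvRepr at *
    rw [pvIter_succ']
    rw [pvRoot_step hroot]
  rw [← h1, h2]

lemma pvRoot_of_repr_self {p : List Int} (hw : pvWf p) (hr : pvRes p) {i : Nat}
    (hi : i < p.length) (h : pvRepr p i = i) : pvRoot p i := by
  have := pvRepr_spec hw hr hi
  rwa [h] at this

-- getD after set --------------------------------------------------------------------
lemma getD_set_eq (p : List Int) {i : Nat} (hi : i < p.length) (v : Int) :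
    (p.set i v).getD i 0 = v := by
  simp [List.getD, hi]

lemma getD_set_ne (p : List Int) {i j : Nat} (hne : i ≠ j) (v : Int) :
    (p.set i v).getD j 0 = p.getD j 0 := by
  simp [List.getD, List.getElem?_set_ne hne]

-- effect of p.set i (repr i) (path compression step) --------------------------------
lemma pvCompress {p : List Int} (hw : pvWf p) (hr : pvRes p) {i : Nat} (hi : i < p.length) :
    pvWf (p.set i (pvRepr p i : Int)) ∧ pvRes (p.set i (pvRepr p i : Int)) ∧
      ∀ j < p.length, pvRepr (p.set i (pvRepr p i : Int)) j = pvRepr p j := by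
  set r := pvRepr p i with hrdef
  set p' := p.set i (r : Int) with hp'
  have hlen : p'.length = p.length := by simp [hp']
  have hrlt : r < p.length := pvRepr_lt hw hi
  have hwf' : pvWf p' := by
    intro j hj
    rw [hlen] at hj
    by_cases hji : j = i
    · subst hji; rw [hp', getD_set_eq p hj]; constructor
      · positivity
      · rw [hlen]; exact_mod_cast hrlt
    · rw [hp', getD_set_ne p (fun h => hji h.symm), hlen]
      exact hw j hj
  have hroot' : ∀ t, pvRoot p t → pvRoot p' t := by
    intro t ht
    by_cases hti : t = i
    · subst hti
      have : r = t := by rw [hrdef, pvRepr_root_fix ht]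
      unfold pvRoot; rw [hp', getD_set_eq p hi, this]
    · unfold pvRoot; rw [hp', getD_set_ne p (fun h => hti h.symm)]; exact ht
  have hrroot : ∀ j, j < p.length → pvRoot p' (pvRepr p j) := by
    intro j hj
    exact hroot' _ (pvRepr_spec hw hr hj)
  have hstep' : ∀ j, j ≠ i → pvStep p' j = pvStep p j := by
    intro j hji
    unfold pvStep; rw [hp', getD_set_ne p (fun h => hji h.symm)]
  have hR : ∀ k j, j < p.length → pvRoot p (pvIter p k j) →
      ∃ k', pvIter p' k' j = pvRepr p j := by
    intro k
    induction k with
    | zero =>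
      intro j hj hroot
      simp only [pvIter, Function.iterate_zero, id_eq] at hroot
      exact ⟨0, by simp [pvIter, pvRepr_root_fix hroot]⟩
    | succ k ih =>
      intro j hj hroot
      by_cases hjr : pvRoot p j
      · exact ⟨0, by simp [pvIter, pvRepr_root_fix hjr]⟩
      · by_cases hji : j = i
        · refine ⟨1, ?_⟩
          have : pvStep p' j = r := by
            unfold pvStep; rw [hp', hji, getD_set_eq p hi]; simp
          simp only [pvIter, Function.iterate_one]
          rw [this, hrdef, hji]
        · rw [pvIter_succ] at hroot
          obtain ⟨k', hk'⟩ := ih (pvStep p j) (pvStep_lt hw hj) hroot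
          refine ⟨k' + 1, ?_⟩
          rw [pvIter_succ, hstep' j hji, hk', pvRepr_step hw hr hj]
  have hres' : pvRes p' := by
    intro j hj
    rw [hlen] at hj
    obtain ⟨k, hk⟩ := hr j hj
    obtain ⟨k', hk'⟩ := hR k j hj hk
    exact ⟨k', by rw [hk']; exact hrroot j hj⟩
  refine ⟨hwf', hres', ?_⟩
  intro j hj
  obtain ⟨k, hk⟩ := hr j hj
  obtain ⟨k', hk'⟩ := hR k j hj hk
  have := pvRoot_reached_repr hwf' hres' (by rwa [hlen]) (by rw [hk']; exact hrroot j hj)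
  rw [hk'] at this
  exact this.symm

-- effect of p.set rb ra for two distinct roots (union step) -------------------------
lemma pvUnionSet {p : List Int} (hw : pvWf p) (hr : pvRes p) {ra rb : Nat}
    (hra : ra < p.length) (hrb : rb < p.length) (hroota : pvRoot p ra) (hrootb : pvRoot p rb)
    (hne : ra ≠ rb) :
    pvWf (p.set rb (ra : Int)) ∧ pvRes (p.set rb (ra : Int)) ∧
      ∀ j < p.length, pvRepr (p.set rb (ra : Int)) j =
        (if pvRepr p j = rb then ra else pvRepr p j) := by
  set p' := p.set rb (ra : Int) with hp'
  have hlen : p'.length = p.length := by simp [hp']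
  have hwf' : pvWf p' := by
    intro j hj
    rw [hlen] at hj
    by_cases hjb : j = rb
    · subst hjb; rw [hp', getD_set_eq p hj]; constructor
      · positivity
      · rw [hlen]; exact_mod_cast hra
    · rw [hp', getD_set_ne p (fun h => hjb h.symm), hlen]
      exact hw j hj
  have hroot' : ∀ t, pvRoot p t → t ≠ rb → pvRoot p' t := by
    intro t ht htb
    unfold pvRoot; rw [hp', getD_set_ne p (fun h => htb h.symm)]; exact ht
  have hroota' : pvRoot p' ra := hroot' ra hroota hne
  have htgt : ∀ j, j < p.length →
      pvRoot p' (if pvRepr p j = rb then ra else pvRepr p j) := by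
    intro j hj
    by_cases h : pvRepr p j = rb
    · rw [if_pos h]; exact hroota'
    · rw [if_neg h]
      exact hroot' _ (pvRepr_spec hw hr hj) h
  have hstep' : ∀ j, j ≠ rb → pvStep p' j = pvStep p j := by
    intro j hjb
    unfold pvStep; rw [hp', getD_set_ne p (fun h => hjb h.symm)]
  have hstepb : pvStep p' rb = ra := by
    unfold pvStep; rw [hp', getD_set_eq p hrb]; simp
  have hR : ∀ k j, j < p.length → pvRoot p (pvIter p k j) →
      ∃ k', pvIter p' k' j = (if pvRepr p j = rb then ra else pvRepr p j) := by
    intro k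
    induction k with
    | zero =>
      intro j hj hroot
      simp only [pvIter, Function.iterate_zero, id_eq] at hroot
      by_cases hjb : j = rb
      · refine ⟨1, ?_⟩
        simp only [pvIter, Function.iterate_one]
        rw [hjb, hstepb, pvRepr_root_fix hrootb, if_pos rfl]
      · refine ⟨0, ?_⟩
        rw [pvRepr_root_fix hroot, if_neg hjb]
        simp [pvIter]
    | succ k ih =>
      intro j hj hroot
      by_cases hjr : pvRoot p j
      · by_cases hjb : j = rb
        · refine ⟨1, ?_⟩
          simp only [pvIter, Function.iterate_one]
          rw [hjb, hstepb, pvRepr_root_fix hrootb, if_pos rfl]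
        · refine ⟨0, ?_⟩
          rw [pvRepr_root_fix hjr, if_neg hjb]
          simp [pvIter]
      · have hjb : j ≠ rb := fun h => hjr (h ▸ hrootb)
        rw [pvIter_succ] at hroot
        obtain ⟨k', hk'⟩ := ih (pvStep p j) (pvStep_lt hw hj) hroot
        refine ⟨k' + 1, ?_⟩
        rw [pvIter_succ, hstep' j hjb, hk', pvRepr_step hw hr hj]
  have hres' : pvRes p' := by
    intro j hj
    rw [hlen] at hj
    obtain ⟨k, hk⟩ := hr j hj
    obtain ⟨k', hk'⟩ := hR k j hj hk
    exact ⟨k', by rw [hk']; exact htgt j hj⟩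
  refine ⟨hwf', hres', ?_⟩
  intro j hj
  obtain ⟨k, hk⟩ := hr j hj
  obtain ⟨k', hk'⟩ := hR k j hj hk
  have := pvRoot_reached_repr hwf' hres' (by rwa [hlen]) (by rw [hk']; exact htgt j hj)
  rw [hk'] at this
  exact this.symm

-- find specification ----------------------------------------------------------------
lemma pvFindA_spec_nat (fuel : Nat) (p : List Int) (i : Nat) (hw : pvWf p) (hr : pvRes p)
    (hi : i < p.length) (hfuel : ∃ k < fuel, pvRoot p (pvIter p k i)) :
    (pvFindA fuel p (i : Int)).1 = (pvRepr p i : Int) ∧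
    (pvFindA fuel p (i : Int)).2.length = p.length ∧
    pvWf (pvFindA fuel p (i : Int)).2 ∧ pvRes (pvFindA fuel p (i : Int)).2 ∧
    ∀ j < p.length, pvRepr (pvFindA fuel p (i : Int)).2 j = pvRepr p j := by
  induction fuel generalizing i with
  | zero =>
    obtain ⟨k, hk, _⟩ := hfuel
    omega
  | succ fuel ih =>
    have hget : PySem.List.pyGetD p (i : Int) 0 = p.getD i 0 := PySem.List.pyGetD_natCast p i 0
    by_cases hroot : pvRoot p i
    · -- p[i] == i: the else branch, returns (p[i], p)
      have hcond : ¬ (PySem.List.pyGetD p (i : Int) 0 ≠ (i : Int)) := by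
        rw [hget]; simpa [pvRoot] using hroot
      have helse : pvFindA (fuel + 1) p (i : Int) = (PySem.List.pyGetD p (i : Int) 0, p) := by
        show (if PySem.List.pyGetD p (i : Int) 0 ≠ (i : Int) then
            (PySem.List.pyGetD (PySem.List.pySetD (pvFindA fuel p (PySem.List.pyGetD p (i : Int) 0)).2 (i : Int) (pvFindA fuel p (PySem.List.pyGetD p (i : Int) 0)).1) (i : Int) 0,
             PySem.List.pySetD (pvFindA fuel p (PySem.List.pyGetD p (i : Int) 0)).2 (i : Int) (pvFindA fuel p (PySem.List.pyGetD p (i : Int) 0)).1)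
          else (PySem.List.pyGetD p (i : Int) 0, p)) = (PySem.List.pyGetD p (i : Int) 0, p)
        rw [if_neg hcond]
      rw [helse]
      refine ⟨?_, rfl, hw, hr, fun j _ => rfl⟩
      rw [hget, hroot, pvRepr_root_fix hroot]
    · -- p[i] != i: recurse, then compress
      have hcond : PySem.List.pyGetD p (i : Int) 0 ≠ (i : Int) := by
        rw [hget]; simpa [pvRoot] using hroot
      have hnn : 0 ≤ p.getD i 0 := (hw i hi).1
      have hpx : PySem.List.pyGetD p (i : Int) 0 = ((pvStep p i : Nat) : Int) := by
        rw [hget]; unfold pvStep; rw [Int.toNat_of_nonneg hnn]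
      have hslt : pvStep p i < p.length := pvStep_lt hw hi
      have hfuel' : ∃ k < fuel, pvRoot p (pvIter p k (pvStep p i)) := by
        obtain ⟨k, hk, hkr⟩ := hfuel
        match k, hk, hkr with
        | 0, hk, hkr =>
          exact absurd (by simpa [pvIter] using hkr) hroot
        | (k+1), hk, hkr =>
          rw [pvIter_succ] at hkr
          exact ⟨k, by omega, hkr⟩
      obtain ⟨ih1, ih2, ih3, ih4, ih5⟩ := ih (pvStep p i) hslt hfuel'
      set p1 := (pvFindA fuel p ((pvStep p i : Nat) : Int)).2 with hp1
      have hrepr1 : pvRepr p1 i = pvRepr p i := ih5 i hi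
      have hthen : pvFindA (fuel + 1) p (i : Int) =
          (PySem.List.pyGetD (PySem.List.pySetD p1 (i : Int) (pvFindA fuel p ((pvStep p i : Nat) : Int)).1) (i : Int) 0,
           PySem.List.pySetD p1 (i : Int) (pvFindA fuel p ((pvStep p i : Nat) : Int)).1) := by
        show (if PySem.List.pyGetD p (i : Int) 0 ≠ (i : Int) then
            (PySem.List.pyGetD (PySem.List.pySetD (pvFindA fuel p (PySem.List.pyGetD p (i : Int) 0)).2 (i : Int) (pvFindA fuel p (PySem.List.pyGetD p (i : Int) 0)).1) (i : Int) 0,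
             PySem.List.pySetD (pvFindA fuel p (PySem.List.pyGetD p (i : Int) 0)).2 (i : Int) (pvFindA fuel p (PySem.List.pyGetD p (i : Int) 0)).1)
          else (PySem.List.pyGetD p (i : Int) 0, p)) = _
        rw [if_pos hcond, hpx, ← hp1]
      have hval : (pvFindA fuel p ((pvStep p i : Nat) : Int)).1 = ((pvRepr p1 i : Nat) : Int) := by
        rw [ih1, pvRepr_step hw hr hi, hrepr1]
      have hset : PySem.List.pySetD p1 (i : Int) ((pvRepr p1 i : Nat) : Int) =
          p1.set i ((pvRepr p1 i : Nat) : Int) := by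
        simp
      obtain ⟨cw, cr, crep⟩ := pvCompress ih3 ih4 (show i < p1.length by omega)
      rw [hthen, hval, hset]
      refine ⟨?_, ?_, cw, cr, ?_⟩
      · rw [PySem.List.pyGetD_natCast, getD_set_eq p1 (by omega), hrepr1]
      · simp [ih2]
      · intro j hj
        rw [crep j (by omega), ih5 j hj]

lemma pvFindA_spec (p : List Int) (x : Int) (hw : pvWf p) (hr : pvRes p)
    (hx : PySem.Raise.InRange p.length x) :
    (pvFindA (p.length + 1) p x).1 = (pvRepr p (pvNorm p.length x) : Int) ∧
    (pvFindA (p.length + 1) p x).2.length = p.length ∧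
    pvWf (pvFindA (p.length + 1) p x).2 ∧ pvRes (pvFindA (p.length + 1) p x).2 ∧
    ∀ j < p.length, pvRepr (pvFindA (p.length + 1) p x).2 j = pvRepr p j := by
  have hnormlt : pvNorm p.length x < p.length := pvNorm_lt _ _ hx
  have hfuel : ∀ t, t < p.length → ∃ k < p.length, pvRoot p (pvIter p k t) := by
    intro t ht
    have hex := hr t ht
    exact ⟨Nat.find hex, pvFind_lt_len hw ht hex, Nat.find_spec hex⟩
  by_cases h0 : 0 ≤ x
  · have hxx : x = ((pvNorm p.length x : Nat) : Int) := by
      simp [pvNorm, h0, Int.toNat_of_nonneg h0]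
    rw [hxx]
    obtain ⟨k, hk, hkr⟩ := hfuel _ hnormlt
    exact pvFindA_spec_nat _ p _ hw hr hnormlt ⟨k, by omega, hkr⟩
  · -- negative index: unfold one step by hand
    set ix := pvNorm p.length x with hix
    have hget : PySem.List.pyGetD p x 0 = p.getD ix 0 := pyGetD_norm p x 0 hx
    have hnn : 0 ≤ p.getD ix 0 := (hw ix hnormlt).1
    have hcond : PySem.List.pyGetD p x 0 ≠ x := by
      rw [hget]; omega
    have hpx : PySem.List.pyGetD p x 0 = ((pvStep p ix : Nat) : Int) := by
      rw [hget]; unfold pvStep; rw [Int.toNat_of_nonneg hnn]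
    have hslt : pvStep p ix < p.length := pvStep_lt hw hnormlt
    obtain ⟨k, hk, hkr⟩ := hfuel _ hslt
    obtain ⟨ih1, ih2, ih3, ih4, ih5⟩ :=
      pvFindA_spec_nat p.length p (pvStep p ix) hw hr hslt ⟨k, hk, hkr⟩
    set p1 := (pvFindA p.length p ((pvStep p ix : Nat) : Int)).2 with hp1
    have hrepr1 : pvRepr p1 ix = pvRepr p ix := ih5 ix hnormlt
    have hthen : pvFindA (p.length + 1) p x =
        (PySem.List.pyGetD (PySem.List.pySetD p1 x (pvFindA p.length p ((pvStep p ix : Nat) : Int)).1) x 0,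
         PySem.List.pySetD p1 x (pvFindA p.length p ((pvStep p ix : Nat) : Int)).1) := by
      show (if PySem.List.pyGetD p x 0 ≠ x then
          (PySem.List.pyGetD (PySem.List.pySetD (pvFindA p.length p (PySem.List.pyGetD p x 0)).2 x (pvFindA p.length p (PySem.List.pyGetD p x 0)).1) x 0,
           PySem.List.pySetD (pvFindA p.length p (PySem.List.pyGetD p x 0)).2 x (pvFindA p.length p (PySem.List.pyGetD p x 0)).1)
        else (PySem.List.pyGetD p x 0, p)) = _
      rw [if_pos hcond, hpx, ← hp1]
    have hval : (pvFindA p.length p ((pvStep p ix : Nat) : Int)).1 = ((pvRepr p1 ix : Nat) : Int) := by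
      rw [ih1, pvRepr_step hw hr hnormlt, hrepr1]
    have hx1 : PySem.Raise.InRange p1.length x := by rwa [ih2]
    have hset : PySem.List.pySetD p1 x ((pvRepr p1 ix : Nat) : Int) =
        p1.set ix ((pvRepr p1 ix : Nat) : Int) := by
      rw [pySetD_norm p1 x _ hx1, ih2, ← hix]
    obtain ⟨cw, cr, crep⟩ := pvCompress ih3 ih4 (show ix < p1.length by omega)
    have hget2 : PySem.List.pyGetD (p1.set ix ((pvRepr p1 ix : Nat) : Int)) x 0 =
        (p1.set ix ((pvRepr p1 ix : Nat) : Int)).getD ix 0 := by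
      rw [pyGetD_norm _ x 0 (by simpa [List.length_set, ih2] using hx), List.length_set, ih2, ← hix]
    rw [hthen, hval, hset]
    refine ⟨?_, ?_, cw, cr, ?_⟩
    · rw [hget2, getD_set_eq p1 (by omega), hrepr1]
    · simp [ih2]
    · intro j hj
      rw [crep j (by omega), ih5 j hj]

-- union specification ---------------------------------------------------------------
lemma pvUnionA_spec (p : List Int) (a b : Int) (hw : pvWf p) (hr : pvRes p)
    (ha : PySem.Raise.InRange p.length a) (hb : PySem.Raise.InRange p.length b) :
    ((pvUnionA p a b).1 = decide (pvRepr p (pvNorm p.length a) ≠ pvRepr p (pvNorm p.length b))) ∧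
    (pvUnionA p a b).2.length = p.length ∧
    pvWf (pvUnionA p a b).2 ∧ pvRes (pvUnionA p a b).2 ∧
    ∀ j < p.length, pvRepr (pvUnionA p a b).2 j =
      (if pvRepr p (pvNorm p.length a) = pvRepr p (pvNorm p.length b) then pvRepr p j
       else if pvRepr p j = pvRepr p (pvNorm p.length b) then pvRepr p (pvNorm p.length a)
       else pvRepr p j) := by
  set ia := pvNorm p.length a with hia
  set ib := pvNorm p.length b with hib
  have hialt : ia < p.length := pvNorm_lt _ _ ha
  have hiblt : ib < p.length := pvNorm_lt _ _ hb
  obtain ⟨fa1, fa2, fa3, fa4, fa5⟩ := pvFindA_spec p a hw hr ha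
  set pA := (pvFindA (p.length + 1) p a).2 with hpA
  have hbA : PySem.Raise.InRange pA.length b := by rwa [fa2]
  obtain ⟨fb1, fb2, fb3, fb4, fb5⟩ := pvFindA_spec pA b fa3 fa4 hbA
  set pB := (pvFindA (pA.length + 1) pA b).2 with hpB
  have hnormb : pvNorm pA.length b = ib := by rw [fa2]
  have hfb1 : (pvFindA (pA.length + 1) pA b).1 = (pvRepr p ib : Int) := by
    rw [fb1, hnormb, fa5 ib hiblt]
  have hlenB : pB.length = p.length := by rw [fb2, fa2]
  have hreprB : ∀ j, j < p.length → pvRepr pB j = pvRepr p j := by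
    intro j hj
    rw [fb5 j (by omega), fa5 j hj]
  set ra := pvRepr p ia with hra
  set rb := pvRepr p ib with hrb
  have hralt : ra < p.length := pvRepr_lt hw hialt
  have hrblt : rb < p.length := pvRepr_lt hw hiblt
  have hu : pvUnionA p a b =
      (if (pvFindA (p.length + 1) p a).1 =
            (pvFindA ((pvFindA (p.length + 1) p a).2.length + 1) (pvFindA (p.length + 1) p a).2 b).1
       then (false, (pvFindA ((pvFindA (p.length + 1) p a).2.length + 1) (pvFindA (p.length + 1) p a).2 b).2)
       else (true, PySem.List.pySetD
          (pvFindA ((pvFindA (p.length + 1) p a).2.length + 1) (pvFindA (p.length + 1) p a).2 b).2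
          (pvFindA ((pvFindA (p.length + 1) p a).2.length + 1) (pvFindA (p.length + 1) p a).2 b).1
          (pvFindA (p.length + 1) p a).1)) := rfl
  rw [hu, ← hpA, ← hpB]
  by_cases heq : ra = rb
  · have hcond : (pvFindA (p.length + 1) p a).1 = (pvFindA (pA.length + 1) pA b).1 := by
      rw [fa1, hfb1, heq]
    rw [if_pos hcond]
    refine ⟨by simp [heq], hlenB, fb3, fb4, ?_⟩
    intro j hj
    rw [hreprB j hj, if_pos heq]
  · have hcond : (pvFindA (p.length + 1) p a).1 ≠ (pvFindA (pA.length + 1) pA b).1 := by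
      rw [fa1, hfb1]
      exact_mod_cast heq
    rw [if_neg hcond]
    -- the new parent array: pB with rb set to ra
    have hrootaB : pvRoot pB ra := by
      apply pvRoot_of_repr_self fb3 fb4 (by omega)
      rw [hreprB ra hralt, hra, pvRepr_root_fix (pvRepr_spec hw hr hialt)]
    have hrootbB : pvRoot pB rb := by
      apply pvRoot_of_repr_self fb3 fb4 (by omega)
      rw [hreprB rb hrblt, hrb, pvRepr_root_fix (pvRepr_spec hw hr hiblt)]
    obtain ⟨uw, ur, urep⟩ := pvUnionSet fb3 fb4 (show ra < pB.length by omega)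
      (show rb < pB.length by omega) hrootaB hrootbB heq
    have hsetform : PySem.List.pySetD pB (pvFindA (pA.length + 1) pA b).1
        (pvFindA (p.length + 1) p a).1 = pB.set rb (ra : Int) := by
      rw [fa1, hfb1]
      simp
    rw [hsetform]
    refine ⟨by simp [heq], by simp [hlenB], uw, ur, ?_⟩
    intro j hj
    rw [urep j (by omega), hreprB j hj, if_neg heq]

-- the coupling invariant ------------------------------------------------------------
def pvInv (p comp : List Int) : Prop :=
  p.length = comp.length ∧ pvWf p ∧ pvRes p ∧
  ∀ i < p.length, ∀ j < p.length,
    (pvRepr p i = pvRepr p j ↔ comp.getD i 0 = comp.getD j 0)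

lemma getD_map_lt (comp : List Int) (f : Int → Int) {i : Nat} (hi : i < comp.length) :
    (comp.map f).getD i 0 = f (comp.getD i 0) := by
  simp [List.getD, hi]

-- the label translation used when both programs merge two classes
lemma pvRelabel_iff {ra rb ri rj : Nat} {cu cv ci cj : Int}
    (hia : ri = ra ↔ ci = cu) (hib : ri = rb ↔ ci = cv)
    (hja : rj = ra ↔ cj = cu) (hjb : rj = rb ↔ cj = cv)
    (hij : ri = rj ↔ ci = cj) :
    ((if ri = rb then ra else ri) = (if rj = rb then ra else rj) ↔
     (if ci = cv then cu else ci) = (if cj = cv then cu else cj)) := by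
  by_cases h1 : ri = rb <;> by_cases h2 : rj = rb
  · simp [h1, h2, hib.mp h1, hjb.mp h2]
  · have hc1 : ci = cv := hib.mp h1
    have hc2 : ¬ cj = cv := fun h => h2 (hjb.mpr h)
    simp only [if_pos h1, if_neg h2, if_pos hc1, if_neg hc2]
    constructor
    · intro h; exact (hja.mp h.symm).symm
    · intro h; exact (hja.mpr h.symm).symm
  · have hc1 : ¬ ci = cv := fun h => h1 (hib.mpr h)
    have hc2 : cj = cv := hjb.mp h2
    simp only [if_neg h1, if_pos h2, if_neg hc1, if_pos hc2]
    constructor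
    · intro h; exact hia.mp h
    · intro h; exact hia.mpr h
  · have hc1 : ¬ ci = cv := fun h => h1 (hib.mpr h)
    have hc2 : ¬ cj = cv := fun h => h2 (hjb.mpr h)
    simp only [if_neg h1, if_neg h2, if_neg hc1, if_neg hc2]
    constructor
    · intro h; exact hij.mp (by exact_mod_cast h)
    · intro h; exact_mod_cast hij.mpr h

lemma pvMain (edges : List (Int × Int × Int)) (p comp : List Int) (flips : Int)
    (hpre : ∀ e ∈ edges, e.2.2 = 1 →
      PySem.Raise.InRange p.length e.1 ∧ PySem.Raise.InRange p.length e.2.1)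
    (hinv : pvInv p comp) :
    (edges.foldl pvLoopA (p, flips)).2 = (edges.foldl pvLoopB (comp, flips)).2 := by
  induction edges generalizing p comp flips with
  | nil => rfl
  | cons e es ih =>
    obtain ⟨hlen, hwf, hres, hiff⟩ := hinv
    simp only [List.foldl_cons]
    by_cases hw1 : e.2.2 = 1
    · obtain ⟨hu, hv⟩ := hpre e (by simp) hw1
      have hpre' : ∀ e' ∈ es, e'.2.2 = 1 →
          PySem.Raise.InRange p.length e'.1 ∧ PySem.Raise.InRange p.length e'.2.1 :=
        fun e' he' => hpre e' (by simp [he'])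
      set ia := pvNorm p.length e.1 with hiadef
      set ib := pvNorm p.length e.2.1 with hibdef
      have hialt : ia < p.length := pvNorm_lt _ _ hu
      have hiblt : ib < p.length := pvNorm_lt _ _ hv
      obtain ⟨u1, u2, u3, u4, u5⟩ := pvUnionA_spec p e.1 e.2.1 hwf hres hu hv
      have hA : pvLoopA (p, flips) e =
          ((pvUnionA p e.1 e.2.1).2,
           if (pvUnionA p e.1 e.2.1).1 then flips else flips + 1) := by
        show (if e.2.2 = 1 then
            ((pvUnionA p e.1 e.2.1).2, if (pvUnionA p e.1 e.2.1).1 then flips else flips + 1)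
          else (p, flips)) = _
        rw [if_pos hw1]
      have hB : pvLoopB (comp, flips) e =
          (if PySem.List.pyGetD comp e.1 0 = PySem.List.pyGetD comp e.2.1 0 then (comp, flips + 1)
           else (comp.map (fun c => if c = PySem.List.pyGetD comp e.2.1 0
                   then PySem.List.pyGetD comp e.1 0 else c), flips)) := by
        show (if e.2.2 = 1 then
            (if PySem.List.pyGetD comp e.1 0 = PySem.List.pyGetD comp e.2.1 0 then (comp, flips + 1)
             else (comp.map (fun c => if c = PySem.List.pyGetD comp e.2.1 0
                     then PySem.List.pyGetD comp e.1 0 else c), flips))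
          else (comp, flips)) = _
        rw [if_pos hw1]
      have hu' : PySem.Raise.InRange comp.length e.1 := hlen ▸ hu
      have hv' : PySem.Raise.InRange comp.length e.2.1 := hlen ▸ hv
      have hcu : PySem.List.pyGetD comp e.1 0 = comp.getD ia 0 := by
        rw [pyGetD_norm comp e.1 0 hu', hiadef, ← hlen]
      have hcv : PySem.List.pyGetD comp e.2.1 0 = comp.getD ib 0 := by
        rw [pyGetD_norm comp e.2.1 0 hv', hibdef, ← hlen]
      rw [hA, hB, hcu, hcv]
      by_cases hreq : pvRepr p ia = pvRepr p ib
      · -- same component: both count a flip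
        have hceq : comp.getD ia 0 = comp.getD ib 0 := (hiff ia hialt ib hiblt).mp hreq
        rw [if_pos hceq, u1]
        have : (decide (pvRepr p ia ≠ pvRepr p ib)) = false := by simp [hreq]
        rw [this]
        simp only [Bool.false_eq_true]
        apply ih _ _ _ (fun e' he' h1 => by rw [u2]; exact hpre' e' he' h1)
        refine ⟨by rw [u2, hlen], u3, u4, ?_⟩
        intro i hi j hj
        rw [u2] at hi hj
        rw [u5 i hi, u5 j hj, if_pos hreq, if_pos hreq]
        exact hiff i hi j hj
      · -- different components: both merge, no flip
        have hcne : ¬ comp.getD ia 0 = comp.getD ib 0 :=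
          fun h => hreq ((hiff ia hialt ib hiblt).mpr h)
        rw [if_neg hcne, u1]
        have : (decide (pvRepr p ia ≠ pvRepr p ib)) = true := by simp [hreq]
        rw [this]
        simp only [if_pos]
        apply ih _ _ _ (fun e' he' h1 => by rw [u2]; exact hpre' e' he' h1)
        refine ⟨by simp [u2, hlen], u3, u4, ?_⟩
        intro i hi j hj
        rw [u2] at hi hj
        rw [u5 i hi, u5 j hj, if_neg hreq, if_neg hreq,
          getD_map_lt comp _ (by rw [← hlen]; exact hi), getD_map_lt comp _ (by rw [← hlen]; exact hj)]
        exact pvRelabel_iff (hiff i hi ia hialt) (hiff i hi ib hiblt)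
          (hiff j hj ia hialt) (hiff j hj ib hiblt) (hiff i hi j hj)
    · have hA : pvLoopA (p, flips) e = (p, flips) := by
        show (if e.2.2 = 1 then
            ((pvUnionA p e.1 e.2.1).2, if (pvUnionA p e.1 e.2.1).1 then flips else flips + 1)
          else (p, flips)) = _
        rw [if_neg hw1]
      have hB : pvLoopB (comp, flips) e = (comp, flips) := by
        show (if e.2.2 = 1 then
            (if PySem.List.pyGetD comp e.1 0 = PySem.List.pyGetD comp e.2.1 0 then (comp, flips + 1)
             else (comp.map (fun c => if c = PySem.List.pyGetD comp e.2.1 0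
                     then PySem.List.pyGetD comp e.1 0 else c), flips))
          else (comp, flips)) = _
        rw [if_neg hw1]
      rw [hA, hB]
      exact ih p comp flips (fun e' he' => hpre e' (by simp [he'])) ⟨hlen, hwf, hres, hiff⟩

-- ===== VERDICT (by name: the statement is the Claim_ definition above) =====
theorem min_flips_to_forest_spec : Claim_equal_min_flips_to_forest := by
  intro n edges _hdom hpre
  unfold Spec_min_flips_to_forest min_flips_to_forest min_flips_to_forest_alt
  set p0 := PySem.List.pyRange 0 n 1 with hp0
  have hlen0 : p0.length = n.toNat := by
    rw [hp0, PySem.List.length_pyRange_one]; simp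
  have hget0 : ∀ i, i < p0.length → p0.getD i 0 = (i : Int) := by
    intro i hi
    rw [hp0, PySem.List.pyRange_one] at hi ⊢
    simp only [List.length_map, List.length_range] at hi
    rw [PySem.List.getD_map_range _ _ _ _ hi]
    simp
  have hroot0 : ∀ i, i < p0.length → pvRoot p0 i := fun i hi => hget0 i hi
  have hwf0 : pvWf p0 := by
    intro i hi
    rw [hget0 i hi]
    exact ⟨by positivity, by exact_mod_cast hi⟩
  have hres0 : pvRes p0 := fun i hi => ⟨0, by simpa [pvIter] using hroot0 i hi⟩
  apply pvMain
  · intro e he h1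
    obtain ⟨h2, h3⟩ := hpre e he h1
    rw [hlen0]
    exact ⟨h2, h3⟩
  · refine ⟨rfl, hwf0, hres0, ?_⟩
    intro i hi j hj
    rw [pvRepr_root_fix (hroot0 i hi), pvRepr_root_fix (hroot0 j hj),
      hget0 i hi, hget0 j hj]
    exact ⟨fun h => by exact_mod_cast h, fun h => by exact_mod_cast h⟩
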